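-- pv_equiv track=rewrite | github.com/gigo-gigo/atcoder | abc/abc425/d.py | solve
-- ===== SOURCE A (Python) =====
-- def solve(H, W, S):
--     def is_valid(x):
--         num_blacks = sum((x + dx) in blacks for dx in [1, W + 2, -1, -W - 2])
--         return num_blacks == 1
--
--     blacks = set()
--     for x, s in enumerate(S):
--         if s == "#":
--             blacks.add(x)
--     new_blacks = set(blacks)
--
--     while new_blacks:
--         next_blacks = set()
--         for x in new_blacks:
--             for dx in [1, W + 2, -1, -W - 2]:
--                 xx = x + dx
--                 if S[xx] != "@" and xx not in blacks and is_valid(xx):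
--                     next_blacks.add(xx)
--         new_blacks = next_blacks
--         blacks |= new_blacks
--
--     return len(blacks)
-- ===== SOURCE B (Python) =====
-- def solve(H, W, S):
--     n = len(S)
--     offs = (1, W + 2, -1, -W - 2)
--     black = [c == "#" for c in S]
--     while True:
--         new = [x for x in range(n)
--                if not black[x] and S[x] != "@"
--                and sum(black[x + dx] for dx in offs if 0 <= x + dx < n) == 1]
--         if not new:
--             return sum(black)
--         for x in new:
--             black[x] = True
-- ===== Notes on version B (the rewrite author's own statement) =====
-- stated objective: alternative
-- what changed: B abandons A's frontier/BFS propagation entirely: it keeps a flat boolean array and runs a naive fixed-point iteration, rescanning the WHOLE grid each round and blackening every white non-'@' cell whose bounded-index black-neighbour count is exactly 1, until a full scan produces nothing; it trades A's per-frontier neighbour generation and set bookkeeping for staged global passes over an array. Pre_ additionally excludes ill-shaped inputs containing '#', on which A either raises IndexError or returns a value produced by Python's negative-index wraparound.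
-- outside the precondition, e.g. on solve(0, 2, '#@@@@.'): A returns 2, B returns 1
import Mathlib
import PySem

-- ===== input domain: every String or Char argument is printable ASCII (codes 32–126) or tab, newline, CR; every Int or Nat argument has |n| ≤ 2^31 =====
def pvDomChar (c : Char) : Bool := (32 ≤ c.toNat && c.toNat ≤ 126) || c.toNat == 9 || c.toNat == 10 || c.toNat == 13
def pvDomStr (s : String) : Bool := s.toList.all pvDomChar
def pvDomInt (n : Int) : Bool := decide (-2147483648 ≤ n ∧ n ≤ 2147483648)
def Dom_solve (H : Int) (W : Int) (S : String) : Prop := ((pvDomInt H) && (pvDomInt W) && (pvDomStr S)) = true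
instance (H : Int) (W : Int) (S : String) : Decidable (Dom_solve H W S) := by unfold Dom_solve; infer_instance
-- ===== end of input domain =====

-- B replaces A's frontier-propagation over sets by a naive fixed-point iteration that rescans the
-- whole grid as a boolean array each round (objective: alternative; return value only).


-- ===== PORT A =====
-- the neighbour-offset list [1, W + 2, -1, -W - 2] of A
def pvOffsA (W : Int) : List Int := [1, W + 2, -1, -W - 2]

-- num_blacks = sum((x + dx) in blacks for dx in [...])
def pvNumBlacks (W : Int) (blacks : PySem.Set Int) (x : Int) : Int :=
  (pvOffsA W).foldl (fun acc dx => acc + (if blacks.contains (x + dx) then 1 else 0)) 0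

-- is_valid(x)
def pvIsValid (W : Int) (blacks : PySem.Set Int) (x : Int) : Bool :=
  pvNumBlacks W blacks x == 1

-- the body of one while-iteration: next_blacks built by the two nested for loops
def pvWaveA (W : Int) (L : List Char) (blacks frontier : PySem.Set Int) : PySem.Set Int :=
  frontier.foldl (fun nb x =>
    (pvOffsA W).foldl (fun nb dx =>
      match PySem.List.pyGet? L (x + dx) with
      | some c =>
          if (c != '@') && !(PySem.Set.contains blacks (x + dx)) && pvIsValid W blacks (x + dx)
          then PySem.Set.add nb (x + dx) else nb
      | none => nb  -- Python raises IndexError here; such inputs are outside Pre_solve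
      ) nb) PySem.Set.empty

-- while new_blacks: … (fuel only totalises the loop; |S|+1 waves always suffice on Pre_ inputs)
def pvLoopA (W : Int) (L : List Char) : Nat → PySem.Set Int → PySem.Set Int → PySem.Set Int
  | 0, blacks, _ => blacks
  | fuel + 1, blacks, frontier =>
    if frontier.isEmpty then blacks
    else
      let nxt := pvWaveA W L blacks frontier
      pvLoopA W L fuel (PySem.Set.union blacks nxt) nxt

def solve (H : Int) (W : Int) (S : String) : Int :=
  let L := S.toList
  let blacks := (PySem.List.enumerate L).foldl
      (fun b p => if p.2 == '#' then PySem.Set.add b p.1 else b) PySem.Set.empty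
  ((pvLoopA W L (L.length + 1) blacks blacks).length : Int)

-- ===== PORT B =====
-- sum(black[x+dx] for dx in offs if 0 <= x+dx < n); indices inside the guard are in range, so getD is exact
def pvDegB (W : Int) (n : Int) (black : List Bool) (x : Int) : Int :=
  ([1, W + 2, -1, -W - 2] : List Int).foldl
    (fun acc dx => if 0 ≤ x + dx ∧ x + dx < n
      then acc + (if black.getD (x + dx).toNat false then 1 else 0) else acc) 0

-- new = [x for x in range(n) if not black[x] and S[x] != "@" and <bounded neighbour sum> == 1]
def pvNewB (W : Int) (L : List Char) (black : List Bool) : List Nat :=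
  (List.range L.length).filter (fun i =>
    !(black.getD i false) && (L.getD i ' ' != '@')
      && (pvDegB W (L.length : Int) black (i : Int) == 1))

-- for x in new: black[x] = True
def pvSetAll (black : List Bool) (new : List Nat) : List Bool :=
  new.foldl (fun b i => b.set i true) black

-- while True: …  (fuel only totalises the loop; each productive pass blackens ≥ 1 cell, so |S|+1 passes suffice)
def pvLoopB (W : Int) (L : List Char) : Nat → List Bool → Int
  | 0, black => (black.count true : Int)
  | fuel + 1, black =>
    let new := pvNewB W L black
    if new.isEmpty then (black.count true : Int)
    else pvLoopB W L fuel (pvSetAll black new)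

def solve_alt (H : Int) (W : Int) (S : String) : Int :=
  let L := S.toList
  pvLoopB W L (L.length + 1) (L.map (fun c => c == '#'))

-- ===== PRECONDITION & SPEC =====
-- cell x lies strictly inside the (H+2)×(W+2) grid of row width W+2
def pvInterior (H W : Int) (x : Int) : Prop :=
  1 ≤ PySem.Int.floordiv x (W + 2) ∧ PySem.Int.floordiv x (W + 2) ≤ H ∧
  1 ≤ PySem.Int.mod x (W + 2) ∧ PySem.Int.mod x (W + 2) ≤ W

-- Pre_ admits every '#'-free input and every well-formed (H+2)×(W+2) grid whose non-interior cells
-- are all '@' (the problem's guaranteed format); it excludes ill-shaped inputs containing '#', on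
-- which A either raises IndexError or returns a value produced by Python's negative-index
-- wraparound, an accident of A's flat-string indexing.
def Pre_solve (H : Int) (W : Int) (S : String) : Prop :=
  S.toList.all (· != '#') = true ∨
  (0 ≤ H ∧ 0 ≤ W ∧ (S.toList.length : Int) = (H + 2) * (W + 2) ∧
   ∀ i ∈ List.range S.toList.length, ¬ pvInterior H W (i : Int) → S.toList.getD i ' ' = '@')

instance (H : Int) (W : Int) (S : String) : Decidable (Pre_solve H W S) := by
  unfold Pre_solve pvInterior; infer_instance

def pvWitness_solve : Int × Int × String := (1, 1, "@@@@#@@@@")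

def Spec_solve (H : Int) (W : Int) (S : String) (out : Int) : Prop := out = solve_alt H W S
instance (H : Int) (W : Int) (S : String) (out : Int) : Decidable (Spec_solve H W S out) := by
  unfold Spec_solve; infer_instance

-- ===== CLAIM (what is proved, stated in full; the proofs are below) =====
def Claim_equal_solve : Prop :=
  ∀ (H : Int) (W : Int) (S : String), Dom_solve H W S → Pre_solve H W S →
    Spec_solve H W S (solve H W S)

-- ===== LEMMAS AND PROOFS =====

-- number of black neighbours of v, as a countP over the offset list
def pvDeg (W : Int) (bs : List Int) (v : Int) : Nat :=
  ([1, W + 2, -1, -W - 2] : List Int).countP (fun dx => bs.contains (v + dx))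

theorem pvContains_eq (s : List Int) (x : Int) :
    PySem.Set.contains s x = decide (x ∈ s) := by
  simp [PySem.Set.contains, List.contains_iff_mem]

theorem pvNumBlacks_eq (W : Int) (bs : PySem.Set Int) (x : Int) :
    pvNumBlacks W bs x = (pvDeg W bs x : Int) := by
  simp only [pvNumBlacks, pvOffsA, pvDeg, List.foldl, List.countP_cons, List.countP_nil]
  simp only [PySem.Set.contains]
  split_ifs <;> norm_num

-- the neighbour list [x + dx for x in xs for dx in offs] (A-side view of the wave)
def pvNbrs (W : Int) (xs : List Int) : List Int :=
  xs.flatMap (fun x => ([1, W + 2, -1, -W - 2] : List Int).map (fun dx => x + dx))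

-- the offset list is closed under negation
theorem pvOffs_neg_mem {W dx : Int} (h : dx ∈ ([1, W + 2, -1, -W - 2] : List Int)) :
    -dx ∈ ([1, W + 2, -1, -W - 2] : List Int) := by
  simp only [List.mem_cons, List.not_mem_nil, or_false] at h ⊢
  rcases h with h | h | h | h <;> omega

theorem pvMem_nbrs_of_deg_pos {W : Int} {s : List Int} {x : Int}
    (h : 0 < pvDeg W s x) : x ∈ pvNbrs W s := by
  obtain ⟨dx, hdx, hc⟩ := List.countP_pos_iff.mp h
  have hmem : x + dx ∈ s := List.contains_iff_mem.mp hc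
  refine List.mem_flatMap.mpr ⟨x + dx, hmem, List.mem_map.mpr ⟨-dx, pvOffs_neg_mem hdx, by ring⟩⟩

theorem pvCountP_or_disjoint {α : Type} (l : List α) (p q : α → Bool)
    (h : ∀ x ∈ l, ¬(p x = true ∧ q x = true)) :
    l.countP (fun x => p x || q x) = l.countP p + l.countP q := by
  induction l with
  | nil => simp
  | cons x t ih =>
    have hx := h x (by simp)
    have ht := ih (fun y hy => h y (by simp [hy]))
    simp only [List.countP_cons, ht]
    cases hp : p x <;> cases hq : q x <;> simp_all <;> omega

theorem pvDeg_append (W : Int) (bs ns : List Int) (v : Int)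
    (hd : ∀ x ∈ ns, x ∉ bs) :
    pvDeg W (bs ++ ns) v = pvDeg W bs v + pvDeg W ns v := by
  unfold pvDeg
  have : ∀ dx ∈ ([1, W + 2, -1, -W - 2] : List Int),
      ((bs ++ ns).contains (v + dx)) = true ↔ (bs.contains (v + dx) || ns.contains (v + dx)) = true := by
    intro dx _; simp
  rw [List.countP_congr this, pvCountP_or_disjoint]
  intro dx _ ⟨hp, hq⟩
  exact hd _ (List.contains_iff_mem.mp hq) (List.contains_iff_mem.mp hp)

theorem pvUnion_append (s t : PySem.Set Int) (ht : t.Nodup) (hd : ∀ x ∈ t, x ∉ s) :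
    PySem.Set.union s t = s ++ t := by
  show PySem.Set.update s t = s ++ t
  induction t generalizing s with
  | nil => simp [PySem.Set.update]
  | cons x t' ih =>
    have hx : x ∉ t' := (List.nodup_cons.mp ht).1
    have hadd : PySem.Set.add s x = s ++ [x] := by
      unfold PySem.Set.add
      rw [if_neg]
      simp only [PySem.Set.contains]
      intro h
      exact hd x (by simp) (List.contains_iff_mem.mp h)
    have hstep : PySem.Set.update s (x :: t') = PySem.Set.update (s ++ [x]) t' := by
      simp [PySem.Set.update, List.foldl_cons, hadd]
    rw [hstep, ih (s ++ [x]) (List.nodup_cons.mp ht).2 (by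
      intro y hy
      simp only [List.mem_append, List.mem_singleton]
      rintro (h | h)
      · exact hd y (by simp [hy]) h
      · exact hx (h ▸ hy))]
    simp

theorem pvPyGet_in (L : List Char) (i : Int) (h0 : 0 ≤ i) (h1 : i < L.length) :
    PySem.List.pyGet? L i = some (L.getD i.toNat ' ') := by
  unfold PySem.List.pyGet? PySem.List.pyIdx?
  rw [if_pos h0, if_pos h1]
  simp only [Option.bind_some]
  rw [List.getElem?_eq_getElem (by omega), List.getD_eq_getElem _ _ (by omega)]

-- A's wave predicate, pulled out of the fold
def pvCondA (W : Int) (L : List Char) (blacks : PySem.Set Int) (xx : Int) : Bool :=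
  match PySem.List.pyGet? L xx with
  | some c => (c != '@') && !(PySem.Set.contains blacks xx) && pvIsValid W blacks xx
  | none => false

theorem pvFold_nbrs (W : Int) (L : List Char) (bs : PySem.Set Int) (fr : List Int) :
    ∀ (init : PySem.Set Int),
    fr.foldl (fun nb x =>
      (pvOffsA W).foldl (fun nb dx =>
        match PySem.List.pyGet? L (x + dx) with
        | some c =>
            if (c != '@') && !(PySem.Set.contains bs (x + dx)) && pvIsValid W bs (x + dx)
            then PySem.Set.add nb (x + dx) else nb
        | none => nb) nb) init
    = (pvNbrs W fr).foldl
        (fun nb xx => if pvCondA W L bs xx then PySem.Set.add nb xx else nb) init := by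
  induction fr with
  | nil => intro init; simp [pvNbrs]
  | cons x t ih =>
    intro init
    have hsplit : pvNbrs W (x :: t)
        = (([1, W + 2, -1, -W - 2] : List Int).map (fun dx => x + dx)) ++ pvNbrs W t := by
      simp [pvNbrs]
    rw [List.foldl_cons, hsplit, List.foldl_append, ih, List.foldl_map]
    congr 1
    show (pvOffsA W).foldl _ init = _
    apply PySem.List.foldl_congr_mem
    intro nb dx _
    unfold pvCondA
    cases PySem.List.pyGet? L (x + dx) <;> simp

theorem pvWaveA_eq_filter (W : Int) (L : List Char) (bs fr : PySem.Set Int) :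
    pvWaveA W L bs fr = PySem.Set.ofList ((pvNbrs W fr).filter (pvCondA W L bs)) := by
  unfold pvWaveA
  rw [pvFold_nbrs, PySem.List.foldl_if_eq_foldl_filter, PySem.Set.ofList_eq_foldl]
  rfl

-- neighbours of an interior cell are in range
theorem pvNbr_range {H W x dx : Int} (hx : pvInterior H W x)
    (hdx : dx ∈ ([1, W + 2, -1, -W - 2] : List Int)) :
    0 ≤ x + dx ∧ x + dx < (H + 2) * (W + 2) := by
  obtain ⟨hq1, hq2, hr1, hr2⟩ := hx
  have hw : (0 : Int) < W + 2 := by omega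
  have hqr := PySem.Int.floordiv_mul_add_mod x (W + 2)
  set q := PySem.Int.floordiv x (W + 2) with hqdef
  set r := PySem.Int.mod x (W + 2) with hrdef
  have p1 : 1 * (W + 2) ≤ q * (W + 2) := by nlinarith
  have p2 : q * (W + 2) ≤ H * (W + 2) := by nlinarith
  simp only [List.mem_cons, List.not_mem_nil, or_false] at hdx
  rcases hdx with h | h | h | h <;> subst h <;> constructor <;> nlinarith

-- an interior cell is itself in range
theorem pvInterior_range {H W x : Int} (hx : pvInterior H W x) :
    0 ≤ x ∧ x < (H + 2) * (W + 2) := by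
  obtain ⟨hq1, hq2, hr1, hr2⟩ := hx
  have hw : (0 : Int) < W + 2 := by omega
  have hqr := PySem.Int.floordiv_mul_add_mod x (W + 2)
  set q := PySem.Int.floordiv x (W + 2) with hqdef
  set r := PySem.Int.mod x (W + 2) with hrdef
  constructor <;> nlinarith

theorem pvInterior_of_ne_at {H W : Int} {L : List Char}
    (hlen : (L.length : Int) = (H + 2) * (W + 2))
    (hb : ∀ i ∈ List.range L.length, ¬ pvInterior H W (i : Int) → L.getD i ' ' = '@')
    {xx : Int} (h0 : 0 ≤ xx) (h1 : xx < (L.length : Int))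
    (hc : L.getD xx.toNat ' ' ≠ '@') : pvInterior H W xx := by
  by_contra h
  apply hc
  have hm : xx.toNat ∈ List.range L.length := by
    simp only [List.mem_range]; omega
  have hcast : ((xx.toNat : Int)) = xx := by omega
  exact hb xx.toNat hm (by rw [hcast]; exact h)

-- B's bounded neighbour sum equals A's is_valid count, under the array/set correspondence
theorem pvDegB_eq {W : Int} {L : List Char} {blacks : List Int} {black : List Bool}
    (hcorr : ∀ i : Nat, black.getD i false = decide ((i : Int) ∈ blacks))
    (hrange : ∀ y ∈ blacks, 0 ≤ y ∧ y < (L.length : Int)) (x : Int) :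
    pvDegB W (L.length : Int) black x = pvNumBlacks W blacks x := by
  unfold pvDegB pvNumBlacks pvOffsA
  apply PySem.List.foldl_congr_mem
  intro acc dx _
  by_cases hg : 0 ≤ x + dx ∧ x + dx < (L.length : Int)
  · rw [if_pos hg]
    congr 1
    have hcast : (((x + dx).toNat : Int)) = x + dx := by omega
    rw [hcorr (x + dx).toNat, hcast, pvContains_eq]
  · rw [if_neg hg]
    have hnm : (x + dx) ∉ blacks := fun hm => hg (hrange _ hm)
    rw [pvContains_eq, decide_eq_false hnm]
    simp

-- count of trues = number of indices holding true
theorem pvCountTrue_eq (black : List Bool) :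
    black.count true = (List.range black.length).countP (fun i => black.getD i false) := by
  induction black with
  | nil => simp
  | cons b bs ih =>
    rw [List.length_cons, List.range_succ_eq_map, List.countP_cons, List.countP_map]
    have h1 : ((fun i => (b :: bs).getD i false) ∘ Nat.succ) = (fun i => bs.getD i false) := by
      funext i; simp [List.getD]
    rw [h1, ← ih]
    simp only [List.getD, List.getElem?_cons_zero, Option.getD_some, List.count_cons]
    cases b <;> simp [Nat.add_comm]

-- |blacks| = number of trues in the corresponding boolean array
theorem pvCount_corr {L : List Char} {blacks : List Int} {black : List Bool}
    (hblen : black.length = L.length)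
    (hcorr : ∀ i : Nat, black.getD i false = decide ((i : Int) ∈ blacks))
    (hnd : blacks.Nodup)
    (hrange : ∀ y ∈ blacks, 0 ≤ y ∧ y < (L.length : Int)) :
    ((black.count true : Nat) : Int) = (blacks.length : Int) := by
  have h1 : black.count true
      = ((List.range L.length).filter (fun (i : Nat) => decide ((i : Int) ∈ blacks))).length := by
    calc black.count true
        = (List.range black.length).countP (fun i => black.getD i false) := pvCountTrue_eq black
      _ = (List.range L.length).countP (fun i => black.getD i false) := by rw [hblen]
      _ = (List.range L.length).countP (fun (i : Nat) => decide ((i : Int) ∈ blacks)) :=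
          List.countP_congr (fun i _ => by rw [hcorr i])
      _ = ((List.range L.length).filter (fun (i : Nat) => decide ((i : Int) ∈ blacks))).length :=
          List.countP_eq_length_filter
  have hperm : (((List.range L.length).filter (fun (i : Nat) => decide ((i : Int) ∈ blacks))).map
      (fun (i : Nat) => (i : Int))).Perm blacks := by
    refine (List.perm_ext_iff_of_nodup ?_ hnd).mpr ?_
    · exact List.Nodup.map (fun a b h => by exact_mod_cast h)
        (List.Nodup.filter _ List.nodup_range)
    · intro a
      simp only [List.mem_map, List.mem_filter, List.mem_range, decide_eq_true_eq]
      constructor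
      · rintro ⟨i, ⟨_, hm⟩, rfl⟩
        exact hm
      · intro ha
        obtain ⟨ha0, ha1⟩ := hrange a ha
        refine ⟨a.toNat, ⟨by omega, ?_⟩, by omega⟩
        rwa [(by omega : ((a.toNat : Int)) = a)]
  have h2 := hperm.length_eq
  rw [List.length_map] at h2
  rw [h1, ← h2]

-- black[i] stays/becomes true exactly for old trues and indices in new
theorem pvGetD_setAll (black : List Bool) (new : List Nat)
    (hlt : ∀ j ∈ new, j < black.length) :
    ∀ i : Nat, (pvSetAll black new).getD i false = (black.getD i false || new.contains i) := by
  induction new generalizing black with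
  | nil => intro i; simp [pvSetAll]
  | cons k t ih =>
    intro i
    have hk : k < black.length := hlt k (by simp)
    have hstep : pvSetAll black (k :: t) = pvSetAll (black.set k true) t := by
      simp [pvSetAll]
    rw [hstep, ih (black.set k true) (by intro j hj; rw [List.length_set]; exact hlt j (by simp [hj])) i]
    by_cases hik : i = k
    · subst hik
      have htrue : (black.set i true).getD i false = true := by
        rw [List.getD_eq_getElem _ _ (by simpa using hk)]
        simp [List.getElem_set_self]
      rw [htrue]
      simp
    · have heq : (black.set k true).getD i false = black.getD i false := by
        by_cases hi : i < black.length
        · rw [List.getD_eq_getElem _ _ (by simpa using hi), List.getD_eq_getElem _ _ hi]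
          exact List.getElem_set_ne (by omega) _
        · rw [List.getD_eq_default _ _ (by simpa using (by omega : ¬ i < black.length)),
              List.getD_eq_default _ _ (by omega)]
      rw [heq]
      simp only [List.contains_cons]
      have hne : (i == k) = false := by simpa using hik
      rw [hne]
      simp

theorem pvLength_setAll (black : List Bool) (new : List Nat) :
    (pvSetAll black new).length = black.length := by
  induction new generalizing black with
  | nil => rfl
  | cons k t ih => simp [pvSetAll, List.foldl_cons] at ih ⊢; rw [ih, List.length_set]

-- the main simulation: A's frontier loop and B's full-grid rescan loop agree
theorem pvLoop_eq {H W : Int} {L : List Char}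
    (hlen : (L.length : Int) = (H + 2) * (W + 2))
    (hb : ∀ i ∈ List.range L.length, ¬ pvInterior H W (i : Int) → L.getD i ' ' = '@') :
    ∀ (fuel : Nat) (blacks frontier : PySem.Set Int) (black : List Bool),
    black.length = L.length →
    (∀ i : Nat, black.getD i false = decide ((i : Int) ∈ blacks)) →
    blacks.Nodup →
    (∀ x ∈ blacks, pvInterior H W x) →
    (∀ x ∈ frontier, pvInterior H W x) →
    (∀ x : Int, 0 ≤ x → x < (L.length : Int) → L.getD x.toNat ' ' ≠ '@' → x ∉ blacks →
      pvDeg W blacks x = 1 → x ∈ pvNbrs W frontier) →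
    ((pvLoopA W L fuel blacks frontier).length : Int) = pvLoopB W L fuel black := by
  intro fuel
  induction fuel with
  | zero =>
    intro blacks frontier black hblen hcorr hnd hbint _ _
    exact (pvCount_corr hblen hcorr hnd
      (fun y hy => by have := pvInterior_range (hbint y hy); omega)).symm
  | succ fuel ih =>
    intro blacks frontier black hblen hcorr hnd hbint hfint hinv3
    have hrange : ∀ y ∈ blacks, 0 ≤ y ∧ y < (L.length : Int) :=
      fun y hy => by have := pvInterior_range (hbint y hy); omega
    -- wave set of A, as a filter
    set nxt := pvWaveA W L blacks frontier with hnxtdef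
    have hnxt : nxt = PySem.Set.ofList ((pvNbrs W frontier).filter (pvCondA W L blacks)) :=
      pvWaveA_eq_filter W L blacks frontier
    set new := pvNewB W L black with hnewdef
    -- membership equivalence between A's wave and B's new list
    have hmemA : ∀ x : Int, x ∈ nxt ↔ (x ∈ pvNbrs W frontier ∧ pvCondA W L blacks x = true) := by
      intro x
      rw [hnxt, PySem.Set.mem_ofList, List.mem_filter]
    have hnbr_rng : ∀ x ∈ pvNbrs W frontier, 0 ≤ x ∧ x < (L.length : Int) := by
      intro x hx
      obtain ⟨y, hy, hx2⟩ := List.mem_flatMap.mp hx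
      obtain ⟨dx, hdx, rfl⟩ := List.mem_map.mp hx2
      have := pvNbr_range (hfint y hy) hdx
      omega
    have hmemB : ∀ i : Nat, i ∈ new ↔ ((i : Int) < (L.length : Int)
        ∧ black.getD i false = false ∧ L.getD i ' ' ≠ '@'
        ∧ pvDegB W (L.length : Int) black (i : Int) = 1) := by
      intro i
      rw [hnewdef]
      unfold pvNewB
      simp only [List.mem_filter, List.mem_range, Bool.and_eq_true, Bool.not_eq_eq_eq_not,
        Bool.not_true, bne_iff_ne, beq_iff_eq, ne_eq]
      constructor
      · rintro ⟨h1, ⟨h2, h3⟩, h4⟩; exact ⟨by omega, h2, h3, h4⟩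
      · rintro ⟨h1, h2, h3, h4⟩; exact ⟨by omega, ⟨h2, h3⟩, h4⟩
    have hAtoB : ∀ x : Int, x ∈ nxt → 0 ≤ x ∧ x.toNat ∈ new := by
      intro x hx
      obtain ⟨hnb, hcond⟩ := (hmemA x).mp hx
      obtain ⟨h0, h1⟩ := hnbr_rng x hnb
      refine ⟨h0, ?_⟩
      rw [hmemB]
      unfold pvCondA at hcond
      rw [pvPyGet_in L x h0 (by exact_mod_cast h1)] at hcond
      simp only [Bool.and_eq_true, bne_iff_ne, ne_eq, Bool.not_eq_eq_eq_not, Bool.not_true] at hcond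
      obtain ⟨⟨hne, hcn⟩, hv⟩ := hcond
      have hxnat : ((x.toNat : Int)) = x := by omega
      have hnm : x ∉ blacks := by
        rw [pvContains_eq] at hcn
        simpa using hcn
      refine ⟨by omega, ?_, hne, ?_⟩
      · rw [hcorr x.toNat, hxnat]; exact decide_eq_false hnm
      · rw [hxnat, pvDegB_eq hcorr hrange x]
        unfold pvIsValid at hv
        simpa using hv
    have hBtoA : ∀ i : Nat, i ∈ new → (i : Int) ∈ nxt := by
      intro i hi
      obtain ⟨h1, h2, h3, h4⟩ := (hmemB i).mp hi
      have h0 : (0 : Int) ≤ (i : Int) := by omega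
      have hnm : (i : Int) ∉ blacks := by
        have := hcorr i
        rw [h2] at this
        exact fun hm => by simp [decide_eq_true_eq, hm] at this
      have hdeg : pvDeg W blacks (i : Int) = 1 := by
        have := @pvDegB_eq W L blacks black hcorr hrange (i : Int)
        rw [h4, pvNumBlacks_eq] at this
        exact_mod_cast this.symm
      have hnb : (i : Int) ∈ pvNbrs W frontier := hinv3 (i : Int) h0 h1 (by simpa using h3) hnm hdeg
      rw [hmemA]
      refine ⟨hnb, ?_⟩
      unfold pvCondA
      rw [pvPyGet_in L (i : Int) h0 (by exact_mod_cast h1)]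
      simp only [Bool.and_eq_true, bne_iff_ne, ne_eq, Bool.not_eq_eq_eq_not, Bool.not_true]
      refine ⟨⟨by simpa using h3, ?_⟩, ?_⟩
      · rw [pvContains_eq]; exact decide_eq_false hnm
      · unfold pvIsValid
        rw [pvNumBlacks_eq, hdeg]
        rfl
    have hnd_nxt : nxt.Nodup := hnxt ▸ PySem.Set.nodup_ofList _
    by_cases hnew : new.isEmpty
    · -- B stops; A's wave (if entered) is empty too, and A returns |blacks| one step later
      have hnewnil : new = [] := List.isEmpty_iff.mp hnew
      have hnxtnil : nxt = [] := by
        rw [List.eq_nil_iff_forall_not_mem]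
        intro x hx
        have := (hAtoB x hx).2
        rw [hnewnil] at this
        exact List.not_mem_nil this
      have hret : ((black.count true : Nat) : Int) = (blacks.length : Int) :=
        pvCount_corr hblen hcorr hnd hrange
      by_cases hfe : frontier.isEmpty
      · simp only [pvLoopA, pvLoopB, hfe, if_true, hnewdef ▸ hnew, hret.symm]
      · simp only [pvLoopA, pvLoopB, hfe, if_false, Bool.false_eq_true, hnewdef ▸ hnew, if_true]
        rw [← hnxtdef, hnxtnil]
        have hu : PySem.Set.union blacks ([] : List Int) = blacks := rfl
        rw [hu]
        cases fuel with
        | zero => exact hret ▸ rfl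
        | succ f =>
          simp only [pvLoopA, List.isEmpty_nil, if_true]
          exact hret ▸ rfl
    · -- both recurse; establish the primed invariants
      have hfne : ¬ frontier.isEmpty := by
        intro hfe
        obtain ⟨i, hi⟩ := List.exists_mem_of_ne_nil new (by simpa [List.isEmpty_iff] using hnew)
        have hm := hBtoA i hi
        obtain ⟨hnb, _⟩ := (hmemA _).mp hm
        rw [List.isEmpty_iff.mp hfe] at hnb
        simp [pvNbrs] at hnb
      have hprops : ∀ x ∈ nxt, 0 ≤ x ∧ x < (L.length : Int)
          ∧ L.getD x.toNat ' ' ≠ '@' ∧ x ∉ blacks := by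
        intro x hx
        obtain ⟨hnb, hcond⟩ := (hmemA x).mp hx
        obtain ⟨h0, h1⟩ := hnbr_rng x hnb
        unfold pvCondA at hcond
        rw [pvPyGet_in L x h0 (by exact_mod_cast h1)] at hcond
        simp only [Bool.and_eq_true, bne_iff_ne, ne_eq, Bool.not_eq_eq_eq_not, Bool.not_true] at hcond
        obtain ⟨⟨hne, hcn⟩, _⟩ := hcond
        refine ⟨h0, h1, hne, ?_⟩
        rw [pvContains_eq] at hcn
        simpa using hcn
      have hdisj : ∀ x ∈ nxt, x ∉ blacks := fun x hx => (hprops x hx).2.2.2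
      have hint_nxt : ∀ x ∈ nxt, pvInterior H W x := by
        intro x hx
        obtain ⟨a, b, c, _⟩ := hprops x hx
        exact pvInterior_of_ne_at hlen hb a b c
      have hunion : PySem.Set.union blacks nxt = blacks ++ nxt := pvUnion_append _ _ hnd_nxt hdisj
      have hnd' : (blacks ++ nxt).Nodup :=
        List.Nodup.append hnd hnd_nxt (fun y hy1 hy2 => hdisj y hy2 hy1)
      have hlt_new : ∀ j ∈ new, j < black.length := by
        intro j hj
        have := ((hmemB j).mp hj).1
        omega
      have hcorr' : ∀ i : Nat, (pvSetAll black new).getD i false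
          = decide ((i : Int) ∈ blacks ++ nxt) := by
        intro i
        rw [pvGetD_setAll black new hlt_new i, hcorr i]
        have hmv : ((i : Int) ∈ blacks ++ nxt) ↔ ((i : Int) ∈ blacks ∨ i ∈ new) := by
          rw [List.mem_append]
          constructor
          · rintro (h | h)
            · exact Or.inl h
            · obtain ⟨_, h2⟩ := hAtoB _ h
              right; simpa using h2
          · rintro (h | h)
            · exact Or.inl h
            · exact Or.inr (hBtoA i h)
        by_cases hib : (i : Int) ∈ blacks <;> by_cases hin : i ∈ new <;>
          simp [hib, hin, hmv, List.contains_iff_mem]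
      have hbint' : ∀ x ∈ blacks ++ nxt, pvInterior H W x := by
        intro x hx
        rcases List.mem_append.mp hx with h | h
        · exact hbint x h
        · exact hint_nxt x h
      have hinv3' : ∀ x : Int, 0 ≤ x → x < (L.length : Int) → L.getD x.toNat ' ' ≠ '@' →
          x ∉ blacks ++ nxt → pvDeg W (blacks ++ nxt) x = 1 → x ∈ pvNbrs W nxt := by
        intro x h0 h1 hne hnm hdeg
        rw [pvDeg_append W blacks nxt x hdisj] at hdeg
        by_cases hpos : 0 < pvDeg W nxt x
        · exact pvMem_nbrs_of_deg_pos (by omega)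
        · have hdb : pvDeg W blacks x = 1 := by omega
          have hnmb : x ∉ blacks := fun h => hnm (List.mem_append.mpr (Or.inl h))
          have hnb := hinv3 x h0 h1 hne hnmb hdb
          have hxin : x ∈ nxt := by
            rw [hmemA]
            refine ⟨hnb, ?_⟩
            unfold pvCondA
            rw [pvPyGet_in L x h0 (by exact_mod_cast h1)]
            simp only [Bool.and_eq_true, bne_iff_ne, ne_eq, Bool.not_eq_eq_eq_not, Bool.not_true]
            refine ⟨⟨hne, by rw [pvContains_eq]; exact decide_eq_false hnmb⟩, ?_⟩
            unfold pvIsValid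
            rw [pvNumBlacks_eq, hdb]
            rfl
          exact absurd (List.mem_append.mpr (Or.inr hxin)) hnm
      have hrec := ih (blacks ++ nxt) nxt (pvSetAll black new)
        (by rw [pvLength_setAll]; exact hblen) hcorr' hnd' hbint' hint_nxt hinv3'
      simp only [pvLoopA, pvLoopB, hfne, if_false, Bool.false_eq_true, hnewdef ▸ hnew, ← hnxtdef]
      rw [hunion]
      exact hrec

-- the initial black set of A, as a filtered enumeration
theorem pvInit_eq (L : List Char) :
    (PySem.List.enumerate L).foldl
      (fun b p => if p.2 == '#' then PySem.Set.add b p.1 else b) PySem.Set.empty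
    = PySem.Set.ofList
        (((PySem.List.enumerate L).filter (fun p => p.2 == '#')).map (fun p => p.1)) := by
  have h := PySem.List.foldl_if_eq_foldl_filter (fun (q : Int × Char) => q.2 == '#')
      (fun (b : PySem.Set Int) q => PySem.Set.add b q.1) (PySem.List.enumerate L) PySem.Set.empty
  exact h.trans (by rw [PySem.Set.ofList_eq_foldl, List.foldl_map]; rfl)

theorem pvMem_init (L : List Char) (x : Int) :
    x ∈ PySem.Set.ofList
        (((PySem.List.enumerate L).filter (fun p => p.2 == '#')).map (fun p => p.1))
    ↔ ∃ k : Nat, ∃ h : k < L.length, x = (k : Int) ∧ L[k] = '#' := by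
  rw [PySem.Set.mem_ofList]
  simp only [List.mem_map, List.mem_filter]
  constructor
  · rintro ⟨p, ⟨hp1, hp2⟩, rfl⟩
    obtain ⟨k, hk, rfl⟩ := (PySem.List.mem_enumerate_iff _ _ _).mp hp1
    exact ⟨k, hk, by omega, by simpa using hp2⟩
  · rintro ⟨k, hk, rfl, hc⟩
    exact ⟨(0 + (k : Int), L[k]), ⟨(PySem.List.mem_enumerate_iff _ _ _).mpr ⟨k, hk, rfl⟩,
      by simpa using hc⟩, by omega⟩

theorem pvInit_interior {H W : Int} {L : List Char}
    (hlen : (L.length : Int) = (H + 2) * (W + 2))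
    (hb : ∀ i ∈ List.range L.length, ¬ pvInterior H W (i : Int) → L.getD i ' ' = '@') :
    ∀ x ∈ PySem.Set.ofList
        (((PySem.List.enumerate L).filter (fun p => p.2 == '#')).map (fun p => p.1)),
      pvInterior H W x := by
  intro x hx
  obtain ⟨k, hk, rfl, hc⟩ := (pvMem_init L x).mp hx
  have h0 : (0 : Int) ≤ (k : Int) := by omega
  have h1 : (k : Int) < (L.length : Int) := by omega
  refine pvInterior_of_ne_at hlen hb h0 h1 ?_
  have : (((k : Int)).toNat) = k := by omega
  rw [this, List.getD_eq_getElem _ _ hk, hc]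
  decide

theorem pvInit_corr (L : List Char) :
    ∀ i : Nat, (L.map (fun c => c == '#')).getD i false
      = decide ((i : Int) ∈ PySem.Set.ofList
          (((PySem.List.enumerate L).filter (fun p => p.2 == '#')).map (fun p => p.1))) := by
  intro i
  by_cases hi : i < L.length
  · rw [List.getD_eq_getElem _ _ (by simpa using hi), List.getElem_map]
    by_cases hc : L[i] = '#'
    · simp only [hc, beq_self_eq_true]
      exact (decide_eq_true ((pvMem_init L _).mpr ⟨i, hi, rfl, hc⟩)).symm
    · have : (L[i] == '#') = false := by simpa using hc
      rw [this]
      refine (decide_eq_false ?_).symm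
      intro hm
      obtain ⟨k, hk, hkeq, hkc⟩ := (pvMem_init L _).mp hm
      have : k = i := by omega
      exact hc (this ▸ hkc)
  · rw [List.getD_eq_default _ _ (by simpa using hi)]
    refine (decide_eq_false ?_).symm
    intro hm
    obtain ⟨k, hk, hkeq, _⟩ := (pvMem_init L _).mp hm
    omega

-- degree over the all-false array is 0
theorem pvDegB_zero {W n : Int} {black : List Bool}
    (h : ∀ j : Nat, black.getD j false = false) (x : Int) :
    pvDegB W n black x = 0 := by
  unfold pvDegB
  simp only [List.foldl, h]
  split_ifs <;> simp_all

theorem solve_spec : Claim_equal_solve := by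
  unfold Claim_equal_solve
  intro H W S _ hpre
  unfold Spec_solve solve solve_alt
  simp only []
  rw [pvInit_eq]
  set L := S.toList with hL
  set B0 := PySem.Set.ofList
      (((PySem.List.enumerate L).filter (fun p => p.2 == '#')).map (fun p => p.1)) with hB0
  rcases hpre with hno | ⟨hH, hW, hlen, hb⟩
  · -- no '#' in S: A's black set is empty and B's first full scan finds nothing
    have hnoc : ∀ k : Nat, (h : k < L.length) → L[k] ≠ '#' := by
      intro k hk hc
      have := List.all_eq_true.mp hno (L[k]) (List.getElem_mem hk)
      simp [hc] at this
    have hempty : B0 = [] := by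
      rw [List.eq_nil_iff_forall_not_mem]
      intro x hx
      obtain ⟨k, hk, _, hc⟩ := (pvMem_init L x).mp (hB0 ▸ hx)
      exact hnoc k hk hc
    have hfalse : ∀ j : Nat, ((L.map (fun c => c == '#')).getD j false) = false := by
      intro j
      rw [pvInit_corr L j, ← hB0, hempty]
      simp
    have hnewnil : pvNewB W L (L.map (fun c => c == '#')) = [] := by
      unfold pvNewB
      rw [List.filter_eq_nil_iff]
      intro i _
      rw [pvDegB_zero hfalse]
      simp
    have hcnt : ((L.map (fun c => c == '#')).count true : Int) = 0 := by
      have : true ∉ L.map (fun c => c == '#') := by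
        intro hm
        obtain ⟨c, hc, hcc⟩ := List.mem_map.mp hm
        have : c = '#' := by simpa using hcc.symm
        have hall := List.all_eq_true.mp hno c hc
        simp [this] at hall
      rw [List.count_eq_zero.mpr this]
      rfl
    rw [hempty]
    simp only [pvLoopA, pvLoopB, List.isEmpty_nil, if_true, hnewnil, List.isEmpty_nil]
    rw [hcnt]
    rfl
  · -- well-formed grid: run the simulation lemma
    refine pvLoop_eq hlen hb (L.length + 1) B0 B0 (L.map (fun c => c == '#'))
      (by rw [List.length_map]) (hB0 ▸ pvInit_corr L) (PySem.Set.nodup_ofList _)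
      (pvInit_interior hlen hb) (pvInit_interior hlen hb) ?_
    intro x _ _ _ _ hdeg
    exact pvMem_nbrs_of_deg_pos (by omega)
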